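-- pv_equiv track=rewrite | github.com/3105Vikcky/SmartMergeAI | smartmerge_ai/ragLLM.py | extract_merge_percentage
-- ===== SOURCE A (Python) =====
-- def extract_merge_percentage(response_text):
--     """
--     Parses the AI response to assign a merge confidence percentage.
--     """
--     response_text = response_text.lower()
--
--     # Define confidence scores based on keywords
--     scores = {
--         "ready to merge": 90,
--         "safe to merge": 85,
--         "minor issues": 75,
--         "requires small changes": 70,
--         "needs review": 60,
--         "possible conflicts": 50,
--         "merge conflicts exist": 40,
--         "requires significant changes": 30,
--         "not recommended": 20,
--         "do not merge": 10
--     }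
--
--     # Find the highest matching score
--     for keyword, score in scores.items():
--         if keyword in response_text:
--             return score
--
--     # Default to 50% if no clear match
--     return 50
-- ===== SOURCE B (Python) =====
-- def extract_merge_percentage(response_text):
--     """
--     Parses the AI response to assign a merge confidence percentage.
--     """
--     text = response_text.lower()
--     scores = {
--         "ready to merge": 90,
--         "safe to merge": 85,
--         "minor issues": 75,
--         "requires small changes": 70,
--         "needs review": 60,
--         "possible conflicts": 50,
--         "merge conflicts exist": 40,
--         "requires significant changes": 30,
--         "not recommended": 20,
--         "do not merge": 10
--     }
--     matches = [score for keyword, score in scores.items() if keyword in text]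
--     return max(matches) if matches else 50
-- ===== Notes on version B (the rewrite author's own statement) =====
-- stated objective: alternative
-- what changed: Instead of returning on the first keyword matched in the dict's iteration order, B collects the scores of all matching keywords and returns their maximum (default 50); equal because the dict's insertion order is strictly descending by score.
import Mathlib
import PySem

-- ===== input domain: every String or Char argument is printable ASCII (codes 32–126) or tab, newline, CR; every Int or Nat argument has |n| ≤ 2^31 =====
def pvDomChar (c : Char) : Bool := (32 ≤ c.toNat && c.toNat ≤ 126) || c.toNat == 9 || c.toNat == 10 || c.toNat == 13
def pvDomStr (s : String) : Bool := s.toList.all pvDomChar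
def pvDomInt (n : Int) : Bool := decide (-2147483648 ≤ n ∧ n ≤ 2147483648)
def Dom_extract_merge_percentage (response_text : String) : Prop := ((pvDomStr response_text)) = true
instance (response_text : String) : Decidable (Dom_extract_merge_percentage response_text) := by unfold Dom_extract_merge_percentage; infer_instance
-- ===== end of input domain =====

-- ===== PORT A =====
-- B changes the decomposition: instead of A's first-match-in-order loop, B collects all matching scores and takes their max (objective: alternative).
def pvScores : List (String × Int) :=
  [("ready to merge", 90), ("safe to merge", 85), ("minor issues", 75),
   ("requires small changes", 70), ("needs review", 60), ("possible conflicts", 50),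
   ("merge conflicts exist", 40), ("requires significant changes", 30),
   ("not recommended", 20), ("do not merge", 10)]

-- A's for-loop with early return: first keyword contained in the text wins, else 50
def pvFirstMatch (l : List (String × Int)) (t : String) : Int :=
  match l with
  | [] => 50
  | (k, v) :: rest => if PySem.Str.isIn k t then v else pvFirstMatch rest t

def extract_merge_percentage (response_text : String) : Int :=
  pvFirstMatch pvScores (PySem.Str.lower response_text)

-- ===== PORT B =====
def extract_merge_percentage_alt (response_text : String) : Int :=
  let text := PySem.Str.lower response_text
  let ms := (pvScores.filter (fun p => PySem.Str.isIn p.1 text)).map Prod.snd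
  match PySem.List.max? ms (fun x => x) with
  | some m => m
  | none => 50

-- ===== PRECONDITION & SPEC =====
def Spec_extract_merge_percentage (response_text : String) (out : Int) : Prop := out = extract_merge_percentage_alt response_text
instance (response_text : String) (out : Int) : Decidable (Spec_extract_merge_percentage response_text out) := by unfold Spec_extract_merge_percentage; infer_instance

-- ===== CLAIM (what is proved, stated in full; the proofs are below) =====
def Claim_equal_extract_merge_percentage : Prop := ∀ (response_text : String), Dom_extract_merge_percentage response_text → Spec_extract_merge_percentage response_text (extract_merge_percentage response_text)

-- ===== LEMMAS AND PROOFS =====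
-- Abstract both sides over the vector of membership booleans, so one `decide` over Bool^10 closes the key fact.
def pvFA : List (Bool × Int) → Int
  | [] => 50
  | (b, v) :: rest => if b then v else pvFA rest

def pvFB (l : List (Bool × Int)) : Int :=
  match PySem.List.max? ((l.filter (fun p => p.1)).map Prod.snd) (fun x => x) with
  | some m => m
  | none => 50

theorem pvFA_eq (t : String) (l : List (String × Int)) :
    pvFirstMatch l t = pvFA (l.map (fun p => (PySem.Str.isIn p.1 t, p.2))) := by
  induction l with
  | nil => rfl
  | cons p rest ih => cases p; simp [pvFirstMatch, pvFA, ih]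

theorem pvFB_eq (t : String) (l : List (String × Int)) :
    ((l.filter (fun p => PySem.Str.isIn p.1 t)).map Prod.snd)
      = ((l.map (fun p => (PySem.Str.isIn p.1 t, p.2))).filter (fun p => p.1)).map Prod.snd := by
  induction l with
  | nil => rfl
  | cons p rest ih =>
    cases p with
    | mk k v =>
      cases h : PySem.Str.isIn k t <;>
        simp [h, ih, -PySem.Str.isIn_eq]

theorem pv_bool_key (b1 b2 b3 b4 b5 b6 b7 b8 b9 b10 : Bool) :
    pvFA [(b1, 90), (b2, 85), (b3, 75), (b4, 70), (b5, 60), (b6, 50), (b7, 40), (b8, 30), (b9, 20), (b10, 10)]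
      = pvFB [(b1, 90), (b2, 85), (b3, 75), (b4, 70), (b5, 60), (b6, 50), (b7, 40), (b8, 30), (b9, 20), (b10, 10)] := by
  revert b1 b2 b3 b4 b5 b6 b7 b8 b9 b10; decide

theorem pv_key (t : String) :
    pvFirstMatch pvScores t =
      (match PySem.List.max? ((pvScores.filter (fun p => PySem.Str.isIn p.1 t)).map Prod.snd) (fun x => x) with
       | some m => m
       | none => 50) := by
  rw [pvFA_eq, pvFB_eq]
  simp only [pvScores, List.map_cons, List.map_nil]
  exact pv_bool_key _ _ _ _ _ _ _ _ _ _

-- ===== VERDICT (by name: the statement is the Claim_ definition above) =====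
theorem extract_merge_percentage_spec : Claim_equal_extract_merge_percentage := by
  intro s _
  show extract_merge_percentage s = extract_merge_percentage_alt s
  exact pv_key (PySem.Str.lower s)
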